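-- pv_equiv track=rewrite | github.com/Err0rCode7/algorithm | Book_이코테/fourth_try/BinarySearch/search words.py | solution
-- ===== SOURCE A (Python) =====
-- import bisect
--
-- def count_by_range(iteration, left_value, right_value):
-- 	left = bisect.bisect_left(iteration, left_value)
-- 	right = bisect.bisect_right(iteration, right_value)
-- 	return right - left
--
-- def solution(words, queries) :
-- 	result = []
-- 	words_by_len = [[] for _ in range(10001)]
-- 	rev_words_by_len = [[] for _ in range(10001)]
-- 	for word in words :
-- 		words_by_len[len(word)].append(word)
-- 		rev_words_by_len[len(word)].append(word[::-1])
--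
-- 	for i in range(10001):
-- 		words_by_len[i].sort()
-- 		rev_words_by_len[i].sort()
--
-- 	for query in queries:
-- 		if query[0] != '?':
-- 			result.append(count_by_range(words_by_len[len(query)], query.replace('?', 'a'), query.replace('?', 'z')))
-- 		else :
-- 			result.append(count_by_range(rev_words_by_len[len(query)], query[::-1].replace('?', 'a'), query[::-1].replace('?', 'z')))
--
-- 	return result
-- ===== SOURCE B (Python) =====
-- def solution(words, queries):
--     result = []
--     for q in queries:
--         if q.startswith('?'):
--             rq = q[::-1]
--             lo, hi = rq.replace('?', 'a'), rq.replace('?', 'z')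
--             result.append(sum(1 for w in words if len(w) == len(q) and lo <= w[::-1] <= hi))
--         else:
--             lo, hi = q.replace('?', 'a'), q.replace('?', 'z')
--             result.append(sum(1 for w in words if len(w) == len(q) and lo <= w <= hi))
--     return result
-- ===== Notes on version B (the rewrite author's own statement) =====
-- stated objective: simpler
-- what changed: Replaces the 10001 fixed length-buckets, per-bucket sorting and bisect binary searches by a direct per-query linear count over the word list (comparing each same-length word, or its reverse, against the '?'->'a' / '?'->'z' range bounds).
import Mathlib
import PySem

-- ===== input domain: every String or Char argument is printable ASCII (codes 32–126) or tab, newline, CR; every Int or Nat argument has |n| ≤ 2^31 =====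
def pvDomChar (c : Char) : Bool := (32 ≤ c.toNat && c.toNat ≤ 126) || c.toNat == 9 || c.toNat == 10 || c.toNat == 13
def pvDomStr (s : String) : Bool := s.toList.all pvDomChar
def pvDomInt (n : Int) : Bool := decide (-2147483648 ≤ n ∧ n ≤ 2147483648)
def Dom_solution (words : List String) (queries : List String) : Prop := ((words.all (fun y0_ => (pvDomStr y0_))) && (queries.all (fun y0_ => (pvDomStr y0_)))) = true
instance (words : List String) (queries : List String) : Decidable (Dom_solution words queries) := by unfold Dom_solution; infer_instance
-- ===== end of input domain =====

-- B replaces A's 10001 length-buckets + per-bucket sort + bisect binary searches by a direct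
-- per-query linear count over the word list (objective: simpler).


-- ===== PORT A =====
-- s[::-1]  (step -1 never raises, so the slice? is always `some`)
def strRev (s : String) : String := (PySem.Str.slice? s none none (-1)).getD ""

-- count_by_range helper of A (bisect.bisect_left / bisect_right are PySem.List.bisectLeft / bisectRight)
def countByRange (it : List String) (lv rv : String) : Int :=
  let left := PySem.List.bisectLeft it lv
  let right := PySem.List.bisectRight it rv
  (right : Int) - (left : Int)

def solution (words : List String) (queries : List String) : List Int :=
  let wbl : List (List String) := (PySem.List.pyRange 0 10001).map (fun _ => [])
  let rwbl : List (List String) := (PySem.List.pyRange 0 10001).map (fun _ => [])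
  let st := words.foldl (fun (st : List (List String) × List (List String)) word =>
      (PySem.List.pySetD st.1 (PySem.Str.len word)
        (PySem.List.pyGetD st.1 (PySem.Str.len word) [] ++ [word]),
       PySem.List.pySetD st.2 (PySem.Str.len word)
        (PySem.List.pyGetD st.2 (PySem.Str.len word) [] ++ [strRev word])))
    (wbl, rwbl)
  let st := (PySem.List.pyRange 0 10001).foldl (fun (st : List (List String) × List (List String)) i =>
      (PySem.List.pySetD st.1 i (PySem.List.sorted (PySem.List.pyGetD st.1 i []) (fun x => x) false),
       PySem.List.pySetD st.2 i (PySem.List.sorted (PySem.List.pyGetD st.2 i []) (fun x => x) false))) st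
  queries.foldl (fun result query =>
      if PySem.Str.pyGet? query 0 ≠ some '?' then
        result ++ [countByRange (PySem.List.pyGetD st.1 (PySem.Str.len query) [])
            (PySem.Str.replace query "?" "a") (PySem.Str.replace query "?" "z")]
      else
        result ++ [countByRange (PySem.List.pyGetD st.2 (PySem.Str.len query) [])
            (PySem.Str.replace (strRev query) "?" "a") (PySem.Str.replace (strRev query) "?" "z")])
    ([] : List Int)

-- ===== PORT B =====
def solution_alt (words : List String) (queries : List String) : List Int :=
  queries.map (fun q =>
    if PySem.Str.startswith q "?" then
      let rq := strRev q
      let lo := PySem.Str.replace rq "?" "a"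
      let hi := PySem.Str.replace rq "?" "z"
      ((words.countP (fun w =>
          PySem.Str.len w == PySem.Str.len q && decide (lo ≤ strRev w) && decide (strRev w ≤ hi))) : Int)
    else
      let lo := PySem.Str.replace q "?" "a"
      let hi := PySem.Str.replace q "?" "z"
      ((words.countP (fun w =>
          PySem.Str.len w == PySem.Str.len q && decide (lo ≤ w) && decide (w ≤ hi))) : Int))

-- ===== PRECONDITION & SPEC =====
-- Pre_ excludes exactly the inputs where Python A raises IndexError: an empty query (query[0])
-- or a word/query longer than 10000 (index out of the 10001 fixed buckets).
def Pre_solution (words : List String) (queries : List String) : Prop :=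
  (∀ w ∈ words, w.toList.length ≤ 10000) ∧ (∀ q ∈ queries, q ≠ "" ∧ q.toList.length ≤ 10000)
instance (words : List String) (queries : List String) : Decidable (Pre_solution words queries) := by
  unfold Pre_solution; infer_instance

def pvWitness_solution : List String × List String := (["apple", "angle"], ["a??le", "?pple"])

def Spec_solution (words : List String) (queries : List String) (out : List Int) : Prop := out = solution_alt words queries
instance (words : List String) (queries : List String) (out : List Int) : Decidable (Spec_solution words queries out) := by unfold Spec_solution; infer_instance

-- ===== CLAIM (what is proved, stated in full; the proofs are below) =====
def Claim_equal_solution : Prop := ∀ (words : List String) (queries : List String), Dom_solution words queries → Pre_solution words queries → Spec_solution words queries (solution words queries)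

-- ===== LEMMAS AND PROOFS =====

-- proof-only names for A's three phases (definitionally equal to the folds in the port)
def pvInit : List (List String) := (PySem.List.pyRange 0 10001).map (fun _ => [])
def pvIns (g : String → String) (ws : List String) (b : List (List String)) : List (List String) :=
  ws.foldl (fun b w => PySem.List.pySetD b (PySem.Str.len w)
    (PySem.List.pyGetD b (PySem.Str.len w) [] ++ [g w])) b
def pvSort (b : List (List String)) : List (List String) :=
  (PySem.List.pyRange 0 10001).foldl (fun b i => PySem.List.pySetD b i
    (PySem.List.sorted (PySem.List.pyGetD b i []) (fun x => x) false)) b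
def pvA1 (words : List String) (query : String) : Int :=
  countByRange (PySem.List.pyGetD (pvSort (pvIns (fun w => w) words pvInit)) (PySem.Str.len query) [])
    (PySem.Str.replace query "?" "a") (PySem.Str.replace query "?" "z")
def pvA2 (words : List String) (query : String) : Int :=
  countByRange (PySem.List.pyGetD (pvSort (pvIns strRev words pvInit)) (PySem.Str.len query) [])
    (PySem.Str.replace (strRev query) "?" "a") (PySem.Str.replace (strRev query) "?" "z")

-- any fold whose step preserves length preserves length
theorem pvFoldLen {β : Type} (f : List (List String) → β → List (List String))
    (h : ∀ b x, (f b x).length = b.length) :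
    ∀ (l : List β) (b : List (List String)), (l.foldl f b).length = b.length := by
  intro l
  induction l with
  | nil => intro b; rfl
  | cons x t ih => intro b; simp [List.foldl_cons, ih, h]

-- the word-insertion fold fills bucket L with the words of length L, in order
theorem pvInsFoldGet (g : String → String) :
    ∀ (ws : List String) (b : List (List String)) (L : Nat), L < b.length →
    (∀ w ∈ ws, w.toList.length < b.length) →
    PySem.List.pyGetD (ws.foldl (fun b w => PySem.List.pySetD b (PySem.Str.len w)
        (PySem.List.pyGetD b (PySem.Str.len w) [] ++ [g w])) b) (L : Int) []
      = PySem.List.pyGetD b (L : Int) []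
          ++ (ws.filter (fun w => w.toList.length == L)).map g := by
  intro ws
  induction ws with
  | nil => intro b L hL _; simp
  | cons w t ih =>
    intro b L hL hws
    have hw : w.toList.length < b.length := hws w (by simp)
    simp only [List.foldl_cons]
    rw [ih _ L (by rw [PySem.List.length_pySetD]; exact hL)
        (fun x hx => by rw [PySem.List.length_pySetD]; exact hws x (List.mem_cons_of_mem _ hx))]
    have hlen : PySem.Str.len w = ((w.toList.length : Nat) : Int) := PySem.Str.len_eq w
    rw [hlen, PySem.List.pyGetD_pySetD_natCast _ _ _ _ _ hw]
    by_cases hLn : L = w.toList.length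
    · subst hLn
      simp [List.filter_cons]
    · have hLn' : ¬ L = w.length := by simpa using hLn
      simp [List.filter_cons, if_neg hLn', (show ¬ w.length = L from fun h => hLn' h.symm)]

-- the sorting fold leaves indices ≥ n untouched
theorem pvSortFoldUntouched :
    ∀ (n : Nat) (b : List (List String)) (L : Nat), n ≤ L → n ≤ b.length →
    PySem.List.pyGetD ((PySem.List.pyRange 0 (n : Int)).foldl
        (fun b i => PySem.List.pySetD b i
          (PySem.List.sorted (PySem.List.pyGetD b i []) (fun x => x) false)) b) (L : Int) []
      = PySem.List.pyGetD b (L : Int) [] := by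
  intro n
  induction n with
  | zero => intro b L _ _; norm_num
  | succ n ih =>
    intro b L hL hb
    have hcast : ((n + 1 : Nat) : Int) = (n : Int) + 1 := by push_cast; ring
    rw [hcast, PySem.List.pyRange_one_succ_right (by positivity), List.foldl_append]
    have hlen : ((PySem.List.pyRange 0 (n : Int)).foldl
        (fun b i => PySem.List.pySetD b i
          (PySem.List.sorted (PySem.List.pyGetD b i []) (fun x => x) false)) b).length = b.length :=
      pvFoldLen _ (fun b x => PySem.List.length_pySetD _ _ _) _ _
    simp only [List.foldl_cons, List.foldl_nil]
    rw [PySem.List.pyGetD_pySetD_natCast _ _ _ _ _ (by omega)]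
    rw [if_neg (by omega)]
    exact ih b L (by omega) (by omega)

-- the sorting fold sorts bucket L
theorem pvSortFoldGet :
    ∀ (n : Nat) (b : List (List String)) (L : Nat), L < n → n ≤ b.length →
    PySem.List.pyGetD ((PySem.List.pyRange 0 (n : Int)).foldl
        (fun b i => PySem.List.pySetD b i
          (PySem.List.sorted (PySem.List.pyGetD b i []) (fun x => x) false)) b) (L : Int) []
      = PySem.List.sorted (PySem.List.pyGetD b (L : Int) []) (fun x => x) false := by
  intro n
  induction n with
  | zero => intro b L hL _; omega
  | succ n ih =>
    intro b L hL hb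
    have hcast : ((n + 1 : Nat) : Int) = (n : Int) + 1 := by push_cast; ring
    rw [hcast, PySem.List.pyRange_one_succ_right (by positivity), List.foldl_append]
    have hlen : ((PySem.List.pyRange 0 (n : Int)).foldl
        (fun b i => PySem.List.pySetD b i
          (PySem.List.sorted (PySem.List.pyGetD b i []) (fun x => x) false)) b).length = b.length :=
      pvFoldLen _ (fun b x => PySem.List.length_pySetD _ _ _) _ _
    simp only [List.foldl_cons, List.foldl_nil]
    rw [PySem.List.pyGetD_pySetD_natCast _ _ _ _ _ (by omega)]
    by_cases hLn : L = n
    · rw [if_pos hLn, hLn, pvSortFoldUntouched n b n le_rfl (by omega)]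
    · rw [if_neg hLn]
      exact ih b L (by omega) (by omega)

-- countP of a predicate that holds exactly on a prefix of length k
theorem pvCountPPrefix (p : String → Bool) (l : List String) (k : Nat) (hk : k ≤ l.length)
    (h1 : ∀ j (hj : j < l.length), j < k → p l[j] = true)
    (h2 : ∀ j (hj : j < l.length), k ≤ j → p l[j] = false) :
    l.countP p = k := by
  conv_lhs => rw [← List.take_append_drop k l]
  rw [List.countP_append]
  have ht : (l.take k).countP p = (l.take k).length := by
    rw [List.countP_eq_length]
    intro a ha
    obtain ⟨i, hi, rfl⟩ := List.mem_iff_getElem.mp ha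
    have hik : i < k := by simp [List.length_take] at hi; omega
    have hil : i < l.length := by simp [List.length_take] at hi; omega
    rw [List.getElem_take]
    exact h1 i hil hik
  have hd : (l.drop k).countP p = 0 := by
    rw [List.countP_eq_zero]
    intro a ha
    obtain ⟨i, hi, rfl⟩ := List.mem_iff_getElem.mp ha
    have hil : k + i < l.length := by simp [List.length_drop] at hi; omega
    rw [List.getElem_drop]
    simp [h2 (k + i) hil (by omega)]
  rw [ht, hd, List.length_take]
  omega

theorem pvBisectLeftLoop (l : List String) (v : String)
    (hs : List.Pairwise (fun a b => a ≤ b) l) :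
    ∀ (fuel lo hi : Nat), lo ≤ hi → hi ≤ l.length → hi - lo ≤ fuel →
    (∀ j (hj : j < l.length), j < lo → l[j] < v) →
    (∀ j (hj : j < l.length), hi ≤ j → ¬ l[j] < v) →
    PySem.List.bisectLeftLoop l v fuel lo hi = l.countP (fun w => decide (w < v)) := by
  intro fuel
  induction fuel with
  | zero =>
    intro lo hi h1 h2 h3 hpre hpost
    have hlh : lo = hi := by omega
    subst hlh
    simp only [PySem.List.bisectLeftLoop]
    symm
    refine pvCountPPrefix _ _ lo (by omega) ?_ ?_
    · intro j hj hjk; simpa using hpre j hj hjk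
    · intro j hj hjk; simpa using hpost j hj hjk
  | succ fuel ih =>
    intro lo hi h1 h2 h3 hpre hpost
    simp only [PySem.List.bisectLeftLoop]
    by_cases hlh : lo < hi
    · rw [if_pos hlh]
      have hmid : (lo + hi) / 2 < l.length := by omega
      rw [List.getElem?_eq_getElem hmid]
      dsimp only
      by_cases hy : l[(lo + hi) / 2] < v
      · rw [if_pos hy]
        refine ih ((lo + hi) / 2 + 1) hi (by omega) h2 (by omega) ?_ hpost
        intro j hj hjk
        rcases (by omega : j < (lo + hi) / 2 ∨ j = (lo + hi) / 2) with hlt | rfl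
        · exact lt_of_le_of_lt (List.pairwise_iff_getElem.mp hs j _ hj hmid hlt) hy
        · exact hy
      · rw [if_neg hy]
        refine ih lo ((lo + hi) / 2) (by omega) (by omega) (by omega) hpre ?_
        intro j hj hjk
        rcases (by omega : (lo + hi) / 2 < j ∨ j = (lo + hi) / 2) with hlt | rfl
        · intro hcon
          exact hy (lt_of_le_of_lt (List.pairwise_iff_getElem.mp hs _ j hmid hj hlt) hcon)
        · exact hy
    · rw [if_neg hlh]
      have hlh' : lo = hi := by omega
      subst hlh'
      symm
      refine pvCountPPrefix _ _ lo (by omega) ?_ ?_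
      · intro j hj hjk; simpa using hpre j hj hjk
      · intro j hj hjk; simpa using hpost j hj hjk

theorem pvBisectRightLoop (l : List String) (v : String)
    (hs : List.Pairwise (fun a b => a ≤ b) l) :
    ∀ (fuel lo hi : Nat), lo ≤ hi → hi ≤ l.length → hi - lo ≤ fuel →
    (∀ j (hj : j < l.length), j < lo → ¬ v < l[j]) →
    (∀ j (hj : j < l.length), hi ≤ j → v < l[j]) →
    PySem.List.bisectRightLoop l v fuel lo hi = l.countP (fun w => !decide (v < w)) := by
  intro fuel
  induction fuel with
  | zero =>
    intro lo hi h1 h2 h3 hpre hpost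
    have hlh : lo = hi := by omega
    subst hlh
    simp only [PySem.List.bisectRightLoop]
    symm
    refine pvCountPPrefix _ _ lo (by omega) ?_ ?_
    · intro j hj hjk; simpa using hpre j hj hjk
    · intro j hj hjk; simpa using hpost j hj hjk
  | succ fuel ih =>
    intro lo hi h1 h2 h3 hpre hpost
    simp only [PySem.List.bisectRightLoop]
    by_cases hlh : lo < hi
    · rw [if_pos hlh]
      have hmid : (lo + hi) / 2 < l.length := by omega
      rw [List.getElem?_eq_getElem hmid]
      dsimp only
      by_cases hy : v < l[(lo + hi) / 2]
      · rw [if_pos hy]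
        refine ih lo ((lo + hi) / 2) (by omega) (by omega) (by omega) hpre ?_
        intro j hj hjk
        rcases (by omega : (lo + hi) / 2 < j ∨ j = (lo + hi) / 2) with hlt | rfl
        · exact lt_of_lt_of_le hy (List.pairwise_iff_getElem.mp hs _ j hmid hj hlt)
        · exact hy
      · rw [if_neg hy]
        refine ih ((lo + hi) / 2 + 1) hi (by omega) h2 (by omega) ?_ hpost
        intro j hj hjk
        rcases (by omega : j < (lo + hi) / 2 ∨ j = (lo + hi) / 2) with hlt | rfl
        · intro hcon
          exact hy (lt_of_lt_of_le hcon (List.pairwise_iff_getElem.mp hs j _ hj hmid hlt))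
        · exact hy
    · rw [if_neg hlh]
      have hlh' : lo = hi := by omega
      subst hlh'
      symm
      refine pvCountPPrefix _ _ lo (by omega) ?_ ?_
      · intro j hj hjk; simpa using hpre j hj hjk
      · intro j hj hjk; simpa using hpost j hj hjk

theorem pvBisectLeftEq (l : List String) (v : String)
    (hs : List.Pairwise (fun a b => a ≤ b) l) :
    PySem.List.bisectLeft l v = l.countP (fun w => decide (w < v)) := by
  unfold PySem.List.bisectLeft
  exact pvBisectLeftLoop l v hs _ _ _ (by omega) le_rfl (by omega)
    (fun j hj hjk => by omega) (fun j hj hjk => by omega)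

theorem pvBisectRightEq (l : List String) (v : String)
    (hs : List.Pairwise (fun a b => a ≤ b) l) :
    PySem.List.bisectRight l v = l.countP (fun w => !decide (v < w)) := by
  unfold PySem.List.bisectRight
  exact pvBisectRightLoop l v hs _ _ _ (by omega) le_rfl (by omega)
    (fun j hj hjk => by omega) (fun j hj hjk => by omega)

-- range count: countP(≤ hi) splits as countP(< lo) + countP(lo ≤ · ≤ hi) when lo ≤ hi
theorem pvCountSplit (l : List String) (lo hi : String) (h : lo ≤ hi) :
    l.countP (fun w => !decide (hi < w))
      = l.countP (fun w => decide (w < lo))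
        + l.countP (fun w => decide (lo ≤ w) && decide (w ≤ hi)) := by
  induction l with
  | nil => simp
  | cons w t ih =>
    simp only [List.countP_cons, ih]
    by_cases hlt : w < lo
    · have h1 : ¬ hi < w := not_lt.mpr (le_of_lt (lt_of_lt_of_le hlt h))
      have h2 : ¬ lo ≤ w := not_le.mpr hlt
      simp [h1, h2, hlt]
      omega
    · have hge : lo ≤ w := not_lt.mp hlt
      by_cases hhi : w ≤ hi
      · simp [hlt, hge, hhi, not_lt.mpr hhi]
        omega
      · have h3 : hi < w := not_le.mp hhi
        simp [hlt, hge, hhi, h3]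

theorem pvReplaceGo (c : Char) :
    ∀ (fuel : Nat) (l acc : List Char), l.length ≤ fuel →
    PySem.Chars.replace.go ['?'] [c] fuel l acc
      = acc.reverse ++ l.map (fun ch => if ch = '?' then c else ch) := by
  intro fuel
  induction fuel with
  | zero =>
    intro l acc h
    have : l = [] := by cases l <;> simp_all
    subst this
    simp [PySem.Chars.replace.go]
  | succ n ih =>
    intro l acc h
    cases l with
    | nil => simp [PySem.Chars.replace.go]
    | cons ch t =>
      simp only [PySem.Chars.replace.go]
      by_cases hch : ch = '?'
      · subst hch
        rw [if_pos (by simp [List.isPrefixOf])]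
        rw [show List.drop (['?'] : List Char).length ('?' :: t) = t from rfl]
        rw [ih t (([c] : List Char).reverse ++ acc) (by simpa using h)]
        simp
      · rw [if_neg (by simp [List.isPrefixOf, Ne.symm hch])]
        rw [ih t (ch :: acc) (by simpa using h)]
        simp [hch]

-- single-character replace is a map
theorem pvReplaceMap (s : List Char) (c : Char) :
    PySem.Chars.replace s ['?'] [c] = s.map (fun ch => if ch = '?' then c else ch) := by
  rw [PySem.Chars.replace]
  rw [if_neg (by simp)]
  simpa using pvReplaceGo c s.length s []

theorem pvNotLexOfForall₂ {s t : List Char}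
    (h : List.Forall₂ (fun a b => a ≤ b) s t) : ¬ List.Lex (· < ·) t s := by
  induction h with
  | nil => exact fun hx => by cases hx
  | @cons a b s' t' ha _ ih =>
    intro hx
    cases hx with
    | rel h' => exact absurd h' (not_lt.mpr ha)
    | cons h' => exact ih h'

theorem pvForallLe (l : List Char) :
    List.Forall₂ (fun a b => a ≤ b)
      (l.map (fun ch => if ch = '?' then 'a' else ch))
      (l.map (fun ch => if ch = '?' then 'z' else ch)) := by
  induction l with
  | nil => simp
  | cons ch t ih =>
    simp only [List.map_cons]
    refine List.Forall₂.cons ?_ ih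
    by_cases hch : ch = '?'
    · simp [hch]
    · simp [hch]

-- the two replace bounds compare: q.replace('?','a') ≤ q.replace('?','z')
theorem pvLoLeHi (q : String) :
    PySem.Str.replace q "?" "a" ≤ PySem.Str.replace q "?" "z" := by
  have la : (PySem.Str.replace q "?" "a").toList
      = q.toList.map (fun ch => if ch = '?' then 'a' else ch) := by
    rw [PySem.Str.toList_replace, show ("?" : String).toList = ['?'] by decide,
      show ("a" : String).toList = ['a'] by decide, pvReplaceMap]
  have lz : (PySem.Str.replace q "?" "z").toList
      = q.toList.map (fun ch => if ch = '?' then 'z' else ch) := by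
    rw [PySem.Str.toList_replace, show ("?" : String).toList = ['?'] by decide,
      show ("z" : String).toList = ['z'] by decide, pvReplaceMap]
  by_contra hcon
  have hlt : PySem.Str.replace q "?" "z" < PySem.Str.replace q "?" "a" := not_le.mp hcon
  rw [String.lt_iff_toList_lt] at hlt
  rw [la, lz] at hlt
  exact pvNotLexOfForall₂ (pvForallLe q.toList) ((List.lt_iff_lex_lt _ _).mp hlt)

-- bucket L of A's sorted tables is the sorted image of the same-length words
theorem pvBucket (g : String → String) (words : List String) (L : Nat)
    (hw : ∀ w ∈ words, w.toList.length ≤ 10000) (hL : L ≤ 10000) :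
    PySem.List.pyGetD (pvSort (pvIns g words pvInit)) (L : Int) []
      = PySem.List.sorted ((words.filter (fun w => w.toList.length == L)).map g)
          (fun x => x) false := by
  have hinit : pvInit.length = 10001 := by
    rw [pvInit, show (10001 : Int) = ((10001 : Nat) : Int) by norm_num,
      PySem.List.pyRange_zero_natCast]
    simp
  have hins : (pvIns g words pvInit).length = 10001 := by
    rw [pvIns, pvFoldLen _ (fun b x => PySem.List.length_pySetD _ _ _), hinit]
  rw [pvSort, show (10001 : Int) = ((10001 : Nat) : Int) by norm_num,
    pvSortFoldGet 10001 _ L (by omega) (by omega)]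
  rw [pvIns, pvInsFoldGet g words pvInit L (by omega)
    (fun w hwm => by have := hw w hwm; omega)]
  rw [show PySem.List.pyGetD pvInit (L : Int) [] = [] by
    rw [pvInit, show (10001 : Int) = ((10001 : Nat) : Int) by norm_num]
    exact PySem.List.pyGetD_map_pyRange _ 10001 L [] (by omega)]
  rw [List.nil_append]

-- count_by_range on a sorted list is the count of the closed range
theorem pvCBR (X : List String) (lo hi : String) (hlh : lo ≤ hi) :
    countByRange (PySem.List.sorted X (fun x => x) false) lo hi
      = (X.countP (fun w => decide (lo ≤ w) && decide (w ≤ hi)) : Int) := by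
  unfold countByRange
  have hp : List.Pairwise (fun a b => a ≤ b) (PySem.List.sorted X (fun x => x) false) := by
    simpa using PySem.List.sorted_pairwise X (fun x => x)
  rw [pvBisectLeftEq _ _ hp, pvBisectRightEq _ _ hp]
  rw [(PySem.List.sorted_perm X _ _).countP_eq, (PySem.List.sorted_perm X _ _).countP_eq]
  rw [pvCountSplit X lo hi hlh]
  push_cast
  ring

-- the per-query value of A equals the per-query value of B
theorem pvPerQuery (words : List String) (q : String)
    (hw : ∀ w ∈ words, w.toList.length ≤ 10000) (hqne : q ≠ "") (hql : q.toList.length ≤ 10000) :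
    (if PySem.Str.pyGet? q 0 ≠ some '?' then pvA1 words q else pvA2 words q)
    = (if PySem.Str.startswith q "?" then
        ((words.countP (fun w =>
          PySem.Str.len w == PySem.Str.len q
            && decide (PySem.Str.replace (strRev q) "?" "a" ≤ strRev w)
            && decide (strRev w ≤ PySem.Str.replace (strRev q) "?" "z"))) : Int)
      else
        ((words.countP (fun w =>
          PySem.Str.len w == PySem.Str.len q
            && decide (PySem.Str.replace q "?" "a" ≤ w)
            && decide (w ≤ PySem.Str.replace q "?" "z"))) : Int)) := by
  obtain ⟨c, t, hct⟩ : ∃ c t, q.toList = c :: t := by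
    cases hqt : q.toList with
    | nil => exact absurd (String.toList_eq_nil_iff.mp hqt) hqne
    | cons c t => exact ⟨c, t, rfl⟩
  have hget : PySem.List.pyGet? q.toList 0 = some c := by
    rw [hct]; simp [PySem.List.pyGet?, PySem.List.pyIdx?]
  have hsw : PySem.Chars.startswith q.toList ['?'] = (c == '?') := by
    rw [hct]; simp [PySem.Chars.startswith, List.isPrefixOf, BEq.comm]
  have hLq : PySem.Str.len q = ((q.toList.length : Nat) : Int) := PySem.Str.len_eq q
  by_cases hc : c = '?'
  · rw [if_neg (by simp [hget, hc]), if_pos (by simp [hsw, hc])]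
    rw [pvA2, hLq, pvBucket strRev words q.toList.length hw hql]
    rw [pvCBR _ _ _ (pvLoLeHi (strRev q))]
    rw [List.countP_map, List.countP_filter]
    congr 1
    refine List.countP_congr ?_
    intro w hwm
    by_cases h1 : PySem.Str.replace (strRev q) "?" "a" ≤ strRev w
      <;> by_cases h2 : strRev w ≤ PySem.Str.replace (strRev q) "?" "z"
      <;> by_cases h3 : w.toList.length = q.toList.length
      <;> simp [Function.comp, h1, h2, h3, PySem.Str.len_eq]
  · rw [if_pos (by simp [hget, hc]), if_neg (by simp [hsw, hc])]
    rw [pvA1, hLq, pvBucket (fun w => w) words q.toList.length hw hql]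
    rw [pvCBR _ _ _ (pvLoLeHi q)]
    rw [List.map_id', List.countP_filter]
    congr 1
    refine List.countP_congr ?_
    intro w hwm
    by_cases h1 : PySem.Str.replace q "?" "a" ≤ w
      <;> by_cases h2 : w ≤ PySem.Str.replace q "?" "z"
      <;> by_cases h3 : w.toList.length = q.toList.length
      <;> simp [h1, h2, h3, PySem.Str.len_eq]

-- A's result loop, written with named per-query values, is a map
theorem pvFoldToMap (words : List String) :
    ∀ (qs : List String) (acc : List Int),
    qs.foldl (fun r query => if PySem.Str.pyGet? query 0 ≠ some '?' then
        r ++ [pvA1 words query] else r ++ [pvA2 words query]) acc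
      = acc ++ qs.map (fun query =>
          if PySem.Str.pyGet? query 0 ≠ some '?' then pvA1 words query else pvA2 words query) := by
  intro qs
  induction qs with
  | nil => intro acc; simp
  | cons x t ih =>
    intro acc
    rw [List.foldl_cons, ih]
    by_cases hcnd : PySem.Str.pyGet? x 0 ≠ some '?'
    · rw [if_pos hcnd, List.map_cons, if_pos hcnd]
      simp
    · rw [if_neg hcnd, List.map_cons, if_neg hcnd]
      simp

-- ===== VERDICT (by name: the statement is the Claim_ definition above) =====
set_option maxRecDepth 100000 in
theorem solution_spec : Claim_equal_solution := by
  intro words queries hdom hpre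
  unfold Spec_solution
  rcases hpre with ⟨hw, hq⟩
  have hA : solution words queries
      = queries.foldl (fun r query => if PySem.Str.pyGet? query 0 ≠ some '?' then
          r ++ [pvA1 words query] else r ++ [pvA2 words query]) [] := by
    simp only [solution, pvA1, pvA2, pvSort, pvIns, pvInit]
    rw [PySem.List.foldl_prod_mk
        (f := fun b word => PySem.List.pySetD b (PySem.Str.len word)
          (PySem.List.pyGetD b (PySem.Str.len word) [] ++ [word]))
        (g := fun b word => PySem.List.pySetD b (PySem.Str.len word)
          (PySem.List.pyGetD b (PySem.Str.len word) [] ++ [strRev word]))]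
    rw [PySem.List.foldl_prod_mk
        (f := fun b i => PySem.List.pySetD b i
          (PySem.List.sorted (PySem.List.pyGetD b i []) (fun x => x) false))
        (g := fun b i => PySem.List.pySetD b i
          (PySem.List.sorted (PySem.List.pyGetD b i []) (fun x => x) false))]
  rw [hA, pvFoldToMap, List.nil_append]
  unfold solution_alt
  refine List.map_congr_left ?_
  intro q hq'
  exact pvPerQuery words q hw (hq q hq').1 (hq q hq').2
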